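-- pv_equiv track=rewrite | github.com/sebastianhutter/the-magnus-archives-to-elasticsearch | transcript/magnusarchives.py | _get_actors_from_actor_line
-- ===== SOURCE A (Python) =====
-- def _get_actors_from_actor_line(line: str):
--     """
--     lets split the actor line up. in some transcripts multiple actors are specified
--     i found one occurence with AND, but I also assume we got some , in there ;-)
--
--     :param line: actor line
--     :return: list of actors
--     """
--
--     # strip CONTINUED from the text before checking
--     actors_line = line.replace('(CONTINUED)', '')
--     actors_line = actors_line.replace('(CONT’D)', '')
--     actors_line = actors_line.replace('(STATEMENT)', '')
--     actors_line = actors_line.strip()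
--
--     # split up the line by , and AND
--     actors = list()
--     for actors_line_separated_by_comma in actors_line.split(','):
--         for actors_line_separated_by_slash in actors_line_separated_by_comma.strip().split('/'):
--             for actors_line_separated_by_AND in actors_line_separated_by_slash.strip().split('AND'):
--                 actors.append(actors_line_separated_by_AND.strip())
--
--     return actors
-- ===== SOURCE B (Python) =====
-- def _get_actors_from_actor_line(line: str):
--     """One-pass tokenizer: scan the cleaned line once, cutting a token at every
--     ',' or '/' character or literal 'AND' substring, then strip each token."""
--
--     # strip CONTINUED from the text before checking (same preprocessing as before)
--     s = line.replace('(CONTINUED)', '')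
--     s = s.replace('(CONT’D)', '')
--     s = s.replace('(STATEMENT)', '')
--     s = s.strip()
--
--     tokens = []
--     cur = []
--     i = 0
--     n = len(s)
--     while i < n:
--         c = s[i]
--         if c == ',' or c == '/':
--             tokens.append(''.join(cur))
--             cur = []
--             i += 1
--         elif s.startswith('AND', i):
--             tokens.append(''.join(cur))
--             cur = []
--             i += 3
--         else:
--             cur.append(c)
--             i += 1
--     tokens.append(''.join(cur))
--     return [t.strip() for t in tokens]
-- ===== Notes on version B (the rewrite author's own statement) =====
-- stated objective: alternative
-- what changed: Replaces the triple-nested split(',')/split('/')/split('AND') loops by a single left-to-right scan that cuts a token at each ',', '/' or literal 'AND' and strips each token once at the end.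
import Mathlib
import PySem

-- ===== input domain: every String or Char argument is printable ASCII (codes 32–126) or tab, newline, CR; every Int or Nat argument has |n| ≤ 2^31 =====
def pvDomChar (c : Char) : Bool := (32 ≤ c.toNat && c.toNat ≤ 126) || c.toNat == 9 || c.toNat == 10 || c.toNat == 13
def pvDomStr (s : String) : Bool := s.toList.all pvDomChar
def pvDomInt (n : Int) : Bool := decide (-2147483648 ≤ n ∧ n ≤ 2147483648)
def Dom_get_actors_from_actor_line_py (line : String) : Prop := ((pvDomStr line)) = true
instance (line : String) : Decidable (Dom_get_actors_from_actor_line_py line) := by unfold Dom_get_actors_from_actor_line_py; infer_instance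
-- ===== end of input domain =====

-- B replaces A's triple-nested split(',')/split('/')/split('AND') loops by a single
-- left-to-right scan cutting a token at each ',', '/' or 'AND' (objective: alternative).

-- shared preprocessing of the line (the replace/strip prologue, identical in A and B)
def pvClean (line : String) : List Char :=
  PySem.Chars.strip
    (PySem.Chars.replace
      (PySem.Chars.replace
        (PySem.Chars.replace line.toList "(CONTINUED)".toList [])
        "(CONT’D)".toList [])
      "(STATEMENT)".toList [])

-- ===== PORT A =====
def get_actors_from_actor_line_py (line : String) : List String :=
  ((PySem.Chars.splitOn (pvClean line) [',']).foldl (fun acc p =>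
    (PySem.Chars.splitOn (PySem.Chars.strip p) ['/']).foldl (fun acc2 q =>
      (PySem.Chars.splitOn (PySem.Chars.strip q) ['A', 'N', 'D']).foldl (fun acc3 r =>
        acc3 ++ [PySem.Chars.strip r]) acc2) acc) []).map String.ofList

-- ===== PORT B =====
-- one-pass tokenizer: cut at ',', '/', or the literal substring "AND"
def pvScan : List Char → List Char → List (List Char)
  | [], cur => [cur.reverse]
  | ',' :: rest, cur => cur.reverse :: pvScan rest []
  | '/' :: rest, cur => cur.reverse :: pvScan rest []
  | 'A' :: 'N' :: 'D' :: rest, cur => cur.reverse :: pvScan rest []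
  | c :: rest, cur => pvScan rest (c :: cur)

def get_actors_from_actor_line_py_alt (line : String) : List String :=
  (pvScan (pvClean line) []).map (fun t => String.ofList (PySem.Chars.strip t))

-- ===== PRECONDITION & SPEC =====
def Spec_get_actors_from_actor_line_py (line : String) (out : List String) : Prop := out = get_actors_from_actor_line_py_alt line
instance (line : String) (out : List String) : Decidable (Spec_get_actors_from_actor_line_py line out) := by unfold Spec_get_actors_from_actor_line_py; infer_instance

-- ===== CLAIM (what is proved, stated in full; the proofs are below) =====
def Claim_equal_get_actors_from_actor_line_py : Prop := ∀ (line : String), Dom_get_actors_from_actor_line_py line → Spec_get_actors_from_actor_line_py line (get_actors_from_actor_line_py line)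

-- ===== LEMMAS AND PROOFS =====

-- clean recursive form of PySem.Chars.splitOn (for sep ≠ [])
def sp (sep : List Char) : List Char → List Char → List (List Char)
  | [], cur => [cur.reverse]
  | c :: rest, cur =>
    if sep.isPrefixOf (c :: rest) then cur.reverse :: sp sep (rest.drop (sep.length - 1)) []
    else sp sep rest (c :: cur)
termination_by l _ => l.length
decreasing_by
  · simp only [List.length_cons, List.length_drop]
    omega
  · simp

theorem sp_nil (sep cur : List Char) : sp sep [] cur = [cur.reverse] := by
  simp [sp]

theorem sp_cons_pos (sep : List Char) (c : Char) (rest cur : List Char)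
    (h : sep.isPrefixOf (c :: rest) = true) :
    sp sep (c :: rest) cur = cur.reverse :: sp sep (rest.drop (sep.length - 1)) [] := by
  rw [sp]; simp [h]

theorem sp_cons_neg (sep : List Char) (c : Char) (rest cur : List Char)
    (h : ¬ sep.isPrefixOf (c :: rest) = true) :
    sp sep (c :: rest) cur = sp sep rest (c :: cur) := by
  rw [sp]; simp [h]

theorem go_eq_sp (sep : List Char) (hne : sep ≠ []) :
    ∀ (fuel : Nat) (l cur : List Char) (acc : List (List Char)), l.length < fuel →
      PySem.Chars.splitOn.go sep fuel l cur acc = acc.reverse ++ sp sep l cur := by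
  intro fuel
  induction fuel with
  | zero => intro l cur acc h; omega
  | succ n ih =>
    intro l cur acc h
    cases l with
    | nil =>
      simp [PySem.Chars.splitOn.go, sp_nil]
    | cons c rest =>
      by_cases hp : sep.isPrefixOf (c :: rest) = true
      · obtain ⟨s0, t, rfl⟩ : ∃ s0 t, sep = s0 :: t := by
          cases sep with
          | nil => exact absurd rfl hne
          | cons s0 t => exact ⟨s0, t, rfl⟩
        have hdrop : List.drop (s0 :: t).length (c :: rest) = rest.drop ((s0 :: t).length - 1) := by
          simp [List.length_cons]
        have hlen : (rest.drop ((s0 :: t).length - 1)).length < n := by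
          have h1 : (rest.drop ((s0 :: t).length - 1)).length ≤ rest.length := by
            simp [List.length_drop]
          have h2 : rest.length + 1 ≤ n := by
            have hpl := hp
            rw [List.isPrefixOf_iff_prefix] at hpl
            have := hpl.length_le
            simp [List.length_cons] at this h ⊢
            omega
          omega
        calc PySem.Chars.splitOn.go (s0 :: t) (n + 1) (c :: rest) cur acc
            = PySem.Chars.splitOn.go (s0 :: t) n (List.drop (s0 :: t).length (c :: rest)) []
                (cur.reverse :: acc) := by
              rw [PySem.Chars.splitOn.go]; simp [hp]
          _ = (cur.reverse :: acc).reverse ++ sp (s0 :: t) (rest.drop ((s0 :: t).length - 1)) [] := by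
              rw [hdrop]; exact ih _ _ _ hlen
          _ = acc.reverse ++ sp (s0 :: t) (c :: rest) cur := by
              rw [sp_cons_pos _ _ _ _ hp]; simp
      · have hlen : rest.length < n := by
          simp [List.length_cons] at h
          -- need rest.length < n; h : rest.length + 1 < n + 1
          omega
        calc PySem.Chars.splitOn.go sep (n + 1) (c :: rest) cur acc
            = PySem.Chars.splitOn.go sep n rest (c :: cur) acc := by
              rw [PySem.Chars.splitOn.go]; simp [hp]
          _ = acc.reverse ++ sp sep rest (c :: cur) := ih _ _ _ hlen
          _ = acc.reverse ++ sp sep (c :: rest) cur := by rw [sp_cons_neg _ _ _ _ hp]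

theorem splitOn_eq_sp (l sep : List Char) (hne : sep ≠ []) :
    PySem.Chars.splitOn l sep = sp sep l [] := by
  have := go_eq_sp sep hne (l.length + 1) l [] [] (by omega)
  simpa [PySem.Chars.splitOn] using this

-- a separator whose characters are not whitespace never matches at a whitespace character
theorem notPrefix_space (sep : List Char) (hne : sep ≠ [])
    (hns : sep.all (fun c => !PySem.Chars.isspace c) = true)
    (c : Char) (hc : PySem.Chars.isspace c = true) (l : List Char) :
    ¬ sep.isPrefixOf (c :: l) = true := by
  cases sep with
  | nil => exact absurd rfl hne
  | cons s0 t =>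
    intro hp
    rw [List.isPrefixOf_iff_prefix] at hp
    obtain ⟨u, hu⟩ := hp
    have hs0 : s0 = c := by
      have := congrArg (fun x => x.head?) hu
      simpa using this
    have hfalse : PySem.Chars.isspace s0 = false := by
      simp [List.all_eq_true] at hns
      exact hns.1
    rw [hs0, hc] at hfalse
    simp at hfalse

-- prepend chars to the first piece
def consHead (x : List Char) : List (List Char) → List (List Char)
  | [] => [x]
  | h :: t => (x ++ h) :: t

theorem consHead_consHead (x y : List Char) (X : List (List Char)) :
    consHead x (consHead y X) = consHead (x ++ y) X := by
  cases X <;> simp [consHead]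

theorem consHead_nil_arg (X : List (List Char)) (hX : X ≠ []) : consHead [] X = X := by
  cases X with
  | nil => exact absurd rfl hX
  | cons h t => simp [consHead]

theorem consHead_append (x : List Char) (X Y : List (List Char)) (hX : X ≠ []) :
    consHead x (X ++ Y) = consHead x X ++ Y := by
  cases X with
  | nil => exact absurd rfl hX
  | cons h t => simp [consHead]

theorem sp_ne_nil (sep l cur : List Char) : sp sep l cur ≠ [] := by
  induction l, cur using sp.induct sep with
  | case1 cur' => simp [sp_nil]
  | case2 c rest cur' h ih =>
    rw [sp_cons_pos _ _ _ _ h]; simp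
  | case3 c rest cur' h ih =>
    rw [sp_cons_neg _ _ _ _ h]; exact ih

theorem sp_ne_nil' (sep l cur : List Char) : ∃ p ps, sp sep l cur = p :: ps := by
  cases hx : sp sep l cur with
  | nil => exact absurd hx (sp_ne_nil sep l cur)
  | cons p ps => exact ⟨p, ps, rfl⟩

theorem sp_cur (sep : List Char) (l : List Char) : ∀ cur,
    sp sep l cur = consHead cur.reverse (sp sep l []) := by
  have H : ∀ (n : Nat) (l : List Char), l.length = n → ∀ cur,
      sp sep l cur = consHead cur.reverse (sp sep l []) := by
    intro n
    induction n using Nat.strong_induction_on with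
    | _ n ih =>
      intro l hl cur
      cases l with
      | nil => simp [sp_nil, consHead]
      | cons c rest =>
        by_cases h : sep.isPrefixOf (c :: rest) = true
        · rw [sp_cons_pos _ _ _ _ h, sp_cons_pos _ _ _ _ h]
          simp [consHead]
        · rw [sp_cons_neg _ _ _ _ h, sp_cons_neg _ _ _ _ h,
            ih rest.length (by simp [← hl]) rest rfl (c :: cur),
            ih rest.length (by simp [← hl]) rest rfl [c], consHead_consHead]
          simp
  exact H l.length l rfl

theorem sp_head_prefix (sep : List Char) (l : List Char) :
    ∃ p ps, sp sep l [] = p :: ps ∧ p <+: l := by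
  have H : ∀ (n : Nat) (l : List Char), l.length = n →
      ∃ p ps, sp sep l [] = p :: ps ∧ p <+: l := by
    intro n
    induction n using Nat.strong_induction_on with
    | _ n ih =>
      intro l hl
      cases l with
      | nil => exact ⟨[], [], by simp [sp_nil], List.nil_prefix⟩
      | cons c rest =>
        by_cases h : sep.isPrefixOf (c :: rest) = true
        · rw [sp_cons_pos _ _ _ _ h]
          exact ⟨[], sp sep (rest.drop (sep.length - 1)) [], by simp, List.nil_prefix⟩
        · obtain ⟨p, ps, hsp, hpre⟩ := ih rest.length (by simp [← hl]) rest rfl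
          rw [sp_cons_neg _ _ _ _ h, sp_cur, hsp]
          exact ⟨c :: p, ps, by simp [consHead], (List.prefix_cons_inj c).mpr hpre⟩
  exact H l.length l rfl

theorem sp_all_space (sep : List Char) (hne : sep ≠ [])
    (hns : sep.all (fun c => !PySem.Chars.isspace c) = true) :
    ∀ (ws : List Char), ws.all PySem.Chars.isspace = true → ∀ cur,
      sp sep ws cur = [cur.reverse ++ ws] := by
  intro ws
  induction ws with
  | nil => intro _ cur; simp [sp_nil]
  | cons c rest ih =>
    intro hws cur
    simp only [List.all_cons, Bool.and_eq_true] at hws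
    rw [sp_cons_neg _ _ _ _ (notPrefix_space sep hne hns c hws.1 rest), ih hws.2]
    simp

-- mapping an lstrip-invariant F over the pieces ignores leading whitespace in the carry
theorem map_sp_cur_congr (sep : List Char) {β : Type} (F : List Char → β)
    (HFl : ∀ a, F (PySem.Chars.lstrip a) = F a) (l : List Char) : ∀ c₁ c₂,
    PySem.Chars.lstrip c₁.reverse = PySem.Chars.lstrip c₂.reverse →
    (sp sep l c₁).map F = (sp sep l c₂).map F := by
  have HF : ∀ a b : List Char, PySem.Chars.lstrip a = PySem.Chars.lstrip b → F a = F b := by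
    intro a b hab
    rw [← HFl a, ← HFl b, hab]
  have H : ∀ (n : Nat) (l : List Char), l.length = n → ∀ c₁ c₂ : List Char,
      PySem.Chars.lstrip c₁.reverse = PySem.Chars.lstrip c₂.reverse →
      (sp sep l c₁).map F = (sp sep l c₂).map F := by
    intro n
    induction n using Nat.strong_induction_on with
    | _ n ih =>
      intro l hl c₁ c₂ hc
      cases l with
      | nil => simp [sp_nil, HF _ _ hc]
      | cons c rest =>
        by_cases h : sep.isPrefixOf (c :: rest) = true
        · rw [sp_cons_pos _ _ _ _ h, sp_cons_pos _ _ _ _ h]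
          simp [HF _ _ hc]
        · rw [sp_cons_neg _ _ _ _ h, sp_cons_neg _ _ _ _ h]
          refine ih rest.length (by simp [← hl]) rest rfl (c :: c₁) (c :: c₂) ?_
          simp only [PySem.Chars.lstrip] at hc
          simp only [List.reverse_cons, PySem.Chars.lstrip, List.dropWhile_append, hc]
  exact fun c₁ c₂ => H l.length l rfl c₁ c₂

theorem map_sp_lstrip (sep : List Char) (hne : sep ≠ [])
    (hns : sep.all (fun c => !PySem.Chars.isspace c) = true)
    {β : Type} (F : List Char → β) (HFl : ∀ a, F (PySem.Chars.lstrip a) = F a)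
    (l : List Char) :
    (sp sep (PySem.Chars.lstrip l) []).map F = (sp sep l []).map F := by
  induction l with
  | nil => rfl
  | cons c rest ih =>
    by_cases hsp : PySem.Chars.isspace c = true
    · have h1 : PySem.Chars.lstrip (c :: rest) = PySem.Chars.lstrip rest := by
        simp [PySem.Chars.lstrip, hsp]
      rw [h1, ih, sp_cons_neg _ _ _ _ (notPrefix_space sep hne hns c hsp rest)]
      refine (map_sp_cur_congr sep F HFl rest [c] [] ?_).symm
      simp [PySem.Chars.lstrip, List.dropWhile, hsp]
    · have h1 : PySem.Chars.lstrip (c :: rest) = c :: rest := by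
        simp [PySem.Chars.lstrip, hsp]
      rw [h1]

theorem prefix_append_ws_iff (sep A ws : List Char) (hne : sep ≠ [])
    (hns : sep.all (fun c => !PySem.Chars.isspace c) = true)
    (hws : ws.all PySem.Chars.isspace = true) (_hA : A ≠ []) :
    sep.isPrefixOf (A ++ ws) = sep.isPrefixOf A := by
  by_cases h1 : sep.isPrefixOf A = true
  · rw [h1, List.isPrefixOf_iff_prefix]
    exact List.prefix_append_of_prefix (List.isPrefixOf_iff_prefix.mp h1)
  · rw [Bool.eq_false_iff.mpr h1, Bool.eq_false_iff]
    intro hp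
    rw [List.isPrefixOf_iff_prefix] at hp h1
    by_cases h2 : sep.length ≤ A.length
    · exact h1 (List.prefix_of_prefix_length_le hp (List.prefix_append A ws) h2)
    · have hA' : A <+: sep :=
        List.prefix_of_prefix_length_le (List.prefix_append A ws) hp (by omega)
      obtain ⟨u, rfl⟩ := hA'
      cases u with
      | nil => exact h1 (by simp)
      | cons u0 ut =>
        have hu : (u0 :: ut) <+: ws := (List.prefix_append_right_inj A).mp hp
        have hu0ws : u0 ∈ ws := hu.mem (by simp)
        have hsp : PySem.Chars.isspace u0 = true := by
          rw [List.all_eq_true] at hws; exact hws u0 hu0ws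
        have hnsp : PySem.Chars.isspace u0 = false := by
          rw [List.all_eq_true] at hns
          simpa using hns u0 (by simp)
        rw [hsp] at hnsp; cases hnsp

theorem map_sp_append_ws (sep : List Char) (hne : sep ≠ [])
    (hns : sep.all (fun c => !PySem.Chars.isspace c) = true)
    {β : Type} (F : List Char → β)
    (HFr : ∀ a ws, ws.all PySem.Chars.isspace = true → F (a ++ ws) = F a)
    (ws : List Char) (hws : ws.all PySem.Chars.isspace = true) (l : List Char) : ∀ cur,
    (sp sep (l ++ ws) cur).map F = (sp sep l cur).map F := by
  have H : ∀ (n : Nat) (l : List Char), l.length = n → ∀ cur,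
      (sp sep (l ++ ws) cur).map F = (sp sep l cur).map F := by
    intro n
    induction n using Nat.strong_induction_on with
    | _ n ih =>
      intro l hl cur
      cases l with
      | nil =>
        rw [List.nil_append, sp_all_space sep hne hns ws hws cur, sp_nil]
        simp [HFr _ _ hws]
      | cons c rest =>
        have hiff : sep.isPrefixOf ((c :: rest) ++ ws) = sep.isPrefixOf (c :: rest) :=
          prefix_append_ws_iff sep (c :: rest) ws hne hns hws (by simp)
        by_cases h : sep.isPrefixOf (c :: rest) = true
        · have h' : sep.isPrefixOf (c :: (rest ++ ws)) = true := by
            rw [show c :: (rest ++ ws) = (c :: rest) ++ ws from rfl, hiff]; exact h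
          have hle : sep.length - 1 ≤ rest.length := by
            have := (List.isPrefixOf_iff_prefix.mp h).length_le
            simp at this; omega
          rw [show (c :: rest) ++ ws = c :: (rest ++ ws) from rfl,
            sp_cons_pos _ _ _ _ h', sp_cons_pos _ _ _ _ h,
            List.drop_append_of_le_length hle]
          simp only [List.map_cons]
          rw [ih (rest.drop (sep.length - 1)).length
            (by simp only [List.length_drop]; simp only [List.length_cons] at hl; omega) _ rfl []]
        · have h' : ¬ sep.isPrefixOf (c :: (rest ++ ws)) = true := by
            rw [show c :: (rest ++ ws) = (c :: rest) ++ ws from rfl, hiff]; exact h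
          rw [show (c :: rest) ++ ws = c :: (rest ++ ws) from rfl,
            sp_cons_neg _ _ _ _ h', sp_cons_neg _ _ _ _ h]
          exact ih rest.length (by simp [← hl]) rest rfl (c :: cur)
  exact fun cur => H l.length l rfl cur

theorem rstrip_decomp (l : List Char) :
    ∃ ws, ws.all PySem.Chars.isspace = true ∧ l = PySem.Chars.rstrip l ++ ws := by
  refine ⟨(l.reverse.takeWhile PySem.Chars.isspace).reverse, ?_, ?_⟩
  · rw [List.all_eq_true]
    intro c hc
    rw [List.mem_reverse] at hc
    exact List.mem_takeWhile_imp hc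
  · rw [PySem.Chars.rstrip, ← List.reverse_append, List.takeWhile_append_dropWhile,
      List.reverse_reverse]

theorem map_sp_strip (sep : List Char) (hne : sep ≠ [])
    (hns : sep.all (fun c => !PySem.Chars.isspace c) = true)
    {β : Type} (F : List Char → β) (HFl : ∀ a, F (PySem.Chars.lstrip a) = F a)
    (HFr : ∀ a ws, ws.all PySem.Chars.isspace = true → F (a ++ ws) = F a)
    (l : List Char) :
    (sp sep (PySem.Chars.strip l) []).map F = (sp sep l []).map F := by
  obtain ⟨ws, hws, hdec⟩ := rstrip_decomp (PySem.Chars.lstrip l)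
  calc (sp sep (PySem.Chars.strip l) []).map F
      = (sp sep (PySem.Chars.rstrip (PySem.Chars.lstrip l) ++ ws) []).map F := by
        rw [map_sp_append_ws sep hne hns F HFr ws hws _ []]; rfl
    _ = (sp sep (PySem.Chars.lstrip l) []).map F := by rw [← hdec]
    _ = (sp sep l []).map F := map_sp_lstrip sep hne hns F HFl l

-- strip : List Char → List Char is itself lstrip- and trailing-whitespace-invariant
theorem strip_lstrip (a : List Char) :
    PySem.Chars.strip (PySem.Chars.lstrip a) = PySem.Chars.strip a := by
  simp [PySem.Chars.strip, PySem.Chars.lstrip, List.dropWhile_idempotent]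

theorem rstrip_append_ws (a ws : List Char) (hws : ws.all PySem.Chars.isspace = true) :
    PySem.Chars.rstrip (a ++ ws) = PySem.Chars.rstrip a := by
  have hnil : ws.reverse.dropWhile PySem.Chars.isspace = [] := by
    rw [List.dropWhile_eq_nil_iff]
    intro c hc
    rw [List.mem_reverse] at hc
    rw [List.all_eq_true] at hws; exact hws c hc
  rw [PySem.Chars.rstrip, PySem.Chars.rstrip, List.reverse_append, List.dropWhile_append, hnil]
  simp

theorem strip_append_ws (a ws : List Char) (hws : ws.all PySem.Chars.isspace = true) :
    PySem.Chars.strip (a ++ ws) = PySem.Chars.strip a := by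
  by_cases h : PySem.Chars.lstrip a = []
  · have ha : a.all PySem.Chars.isspace = true := by
      rw [List.all_eq_true]
      intro c hc
      by_contra hcc
      have := List.dropWhile_eq_nil_iff.mp h c hc
      exact hcc this
    have h2 : PySem.Chars.lstrip (a ++ ws) = [] := by
      rw [PySem.Chars.lstrip, List.dropWhile_eq_nil_iff]
      intro c hc
      rcases List.mem_append.mp hc with hca | hcw
      · exact List.all_eq_true.mp ha c hca
      · exact List.all_eq_true.mp hws c hcw
    simp [PySem.Chars.strip, h, h2, PySem.Chars.rstrip]
  · have h2 : PySem.Chars.lstrip (a ++ ws) = PySem.Chars.lstrip a ++ ws := by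
      rw [PySem.Chars.lstrip, List.dropWhile_append]
      simp [PySem.Chars.lstrip] at h
      obtain ⟨x, hx, hxf⟩ := h
      have hcond : ¬ ∀ x ∈ a, PySem.Chars.isspace x = true := fun hall => by
        rw [hall x hx] at hxf; cases hxf
      simp only [List.isEmpty_iff, List.dropWhile_eq_nil_iff]
      rw [if_neg hcond]
      simp [PySem.Chars.lstrip]
    rw [PySem.Chars.strip, PySem.Chars.strip, h2, rstrip_append_ws _ _ hws]

-- the three separators
theorem sepc_ok : (([','] : List Char) ≠ [] ∧ ([','] : List Char).all (fun c => !PySem.Chars.isspace c) = true) := by decide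
theorem seps_ok : ((['/'] : List Char) ≠ [] ∧ (['/'] : List Char).all (fun c => !PySem.Chars.isspace c) = true) := by decide
theorem sepa_ok : ((['A','N','D'] : List Char) ≠ [] ∧ (['A','N','D'] : List Char).all (fun c => !PySem.Chars.isspace c) = true) := by decide

-- inner two levels of A, as functions of the comma piece / slash piece
def pvG (q : List Char) : List String :=
  (sp ['A','N','D'] q []).map (fun r => String.ofList (PySem.Chars.strip r))

def pvF (p : List Char) : List (List Char) :=
  (sp ['/'] p []).flatMap (fun q => sp ['A','N','D'] q [])

def pvN (l : List Char) : List (List Char) :=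
  (sp [','] l []).flatMap pvF

theorem pvF_ne_nil (p : List Char) : pvF p ≠ [] := by
  obtain ⟨q, qs, hq⟩ := sp_ne_nil' ['/'] p []
  rw [pvF, hq, List.flatMap_cons]
  intro hcontra
  rcases List.append_eq_nil_iff.mp hcontra with ⟨h1, _⟩
  exact sp_ne_nil _ _ _ h1

theorem pvN_ne_nil (l : List Char) : pvN l ≠ [] := by
  obtain ⟨p, ps, hp⟩ := sp_ne_nil' [','] l []
  rw [pvN, hp, List.flatMap_cons]
  intro hcontra
  rcases List.append_eq_nil_iff.mp hcontra with ⟨h1, _⟩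
  exact pvF_ne_nil _ h1

theorem pvF_nil : pvF [] = [[]] := by
  rw [pvF, sp_nil]
  simp only [List.reverse_nil, List.flatMap_cons, List.flatMap_nil, List.append_nil]
  rw [sp_nil]
  rfl

theorem pvF_slash (p : List Char) : pvF ('/' :: p) = [] :: pvF p := by
  rw [pvF, sp_cons_pos ['/'] '/' p [] (by simp [List.isPrefixOf])]
  simp only [List.length_cons, List.length_nil, List.reverse_nil, List.flatMap_cons]
  rw [sp_nil]
  rfl

theorem pvF_and (p : List Char) : pvF ('A' :: 'N' :: 'D' :: p) = [] :: pvF p := by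
  rw [pvF, sp_cons_neg ['/'] 'A' _ [] (by simp [List.isPrefixOf]),
    sp_cons_neg ['/'] 'N' _ _ (by simp [List.isPrefixOf]),
    sp_cons_neg ['/'] 'D' _ _ (by simp [List.isPrefixOf]),
    sp_cur]
  obtain ⟨q, qs, hq⟩ := sp_ne_nil' ['/'] p []
  rw [hq]
  simp only [consHead, List.reverse_cons, List.reverse_nil, List.nil_append, List.flatMap_cons]
  rw [show (['A'] ++ ['N'] ++ ['D'] : List Char) ++ q = 'A' :: 'N' :: 'D' :: q by simp,
    sp_cons_pos ['A','N','D'] 'A' ('N' :: 'D' :: q) [] (by simp [List.isPrefixOf]),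
    show (('N' :: 'D' :: q).drop ((['A','N','D'] : List Char).length - 1)) = q by simp]
  rw [pvF, hq, List.flatMap_cons]
  rfl

theorem pvF_generic (c : Char) (p A : List Char) (hs : c ≠ '/')
    (hpre : (c :: p) <+: A) (hAND : ¬ (['A','N','D'] : List Char).isPrefixOf A = true) :
    pvF (c :: p) = consHead [c] (pvF p) := by
  rw [pvF, sp_cons_neg ['/'] c p [] (by simp [List.isPrefixOf]; intro h; exact absurd h.symm hs),
    sp_cur]
  obtain ⟨q, qs, hq⟩ := sp_ne_nil' ['/'] p []
  have hqpre : q <+: p := by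
    obtain ⟨q', qs', hq', hpre'⟩ := sp_head_prefix ['/'] p
    rw [hq] at hq'; cases hq'; exact hpre'
  rw [hq]
  simp only [consHead, List.reverse_cons, List.reverse_nil, List.nil_append, List.flatMap_cons]
  have hnA : ¬ (['A','N','D'] : List Char).isPrefixOf (c :: q) = true := by
    intro h
    refine hAND ?_
    rw [List.isPrefixOf_iff_prefix] at h ⊢
    exact h.trans (((List.prefix_cons_inj c).mpr hqpre).trans hpre)
  rw [show ([c] ++ q : List Char) = c :: q from rfl,
    sp_cons_neg ['A','N','D'] c q [] hnA, sp_cur]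
  obtain ⟨r, rs, hr⟩ := sp_ne_nil' ['A','N','D'] q []
  rw [hr]
  simp only [consHead, List.reverse_cons, List.reverse_nil, List.nil_append]
  rw [pvF, hq, List.flatMap_cons, hr]
  simp

theorem pvN_comma (rest : List Char) : pvN (',' :: rest) = [] :: pvN rest := by
  rw [pvN, sp_cons_pos [','] ',' rest [] (by simp [List.isPrefixOf])]
  simp only [List.length_cons, List.length_nil, List.reverse_nil, List.flatMap_cons, pvF_nil]
  rfl

theorem pvN_slash (rest : List Char) : pvN ('/' :: rest) = [] :: pvN rest := by
  rw [pvN, sp_cons_neg [','] '/' rest [] (by simp [List.isPrefixOf]), sp_cur]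
  obtain ⟨p, ps, hp⟩ := sp_ne_nil' [','] rest []
  rw [hp]
  simp only [consHead, List.reverse_cons, List.reverse_nil, List.nil_append, List.flatMap_cons]
  rw [show (['/'] ++ p : List Char) = '/' :: p from rfl, pvF_slash]
  rw [pvN, hp, List.flatMap_cons]
  rfl

theorem pvN_and (rest : List Char) : pvN ('A' :: 'N' :: 'D' :: rest) = [] :: pvN rest := by
  rw [pvN, sp_cons_neg [','] 'A' _ [] (by simp [List.isPrefixOf]),
    sp_cons_neg [','] 'N' _ _ (by simp [List.isPrefixOf]),
    sp_cons_neg [','] 'D' _ _ (by simp [List.isPrefixOf]),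
    sp_cur]
  obtain ⟨p, ps, hp⟩ := sp_ne_nil' [','] rest []
  rw [hp]
  simp only [consHead, List.reverse_cons, List.reverse_nil, List.nil_append, List.flatMap_cons]
  rw [show ((['A'] ++ ['N'] ++ ['D'] : List Char) ++ p) = 'A' :: 'N' :: 'D' :: p by simp,
    pvF_and]
  rw [pvN, hp, List.flatMap_cons]
  rfl

theorem pvN_generic (c : Char) (rest : List Char) (hc : c ≠ ',') (hs : c ≠ '/')
    (hAND : ¬ (['A','N','D'] : List Char).isPrefixOf (c :: rest) = true) :
    pvN (c :: rest) = consHead [c] (pvN rest) := by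
  obtain ⟨p, ps, hp⟩ := sp_ne_nil' [','] rest []
  have hppre : p <+: rest := by
    obtain ⟨p', ps', hp', hpre'⟩ := sp_head_prefix [','] rest
    rw [hp] at hp'; cases hp'; exact hpre'
  have h1 : pvN (c :: rest) = pvF (c :: p) ++ List.flatMap pvF ps := by
    rw [pvN, sp_cons_neg [','] c rest []
        (by simp [List.isPrefixOf]; intro h; exact absurd h.symm hc),
      sp_cur, hp]
    simp only [consHead, List.reverse_cons, List.reverse_nil, List.nil_append, List.flatMap_cons]
    rfl
  rw [h1, pvF_generic c p (c :: rest) hs ((List.prefix_cons_inj c).mpr hppre) hAND,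
    ← consHead_append _ _ _ (pvF_ne_nil p), ← List.flatMap_cons, ← hp]
  rfl

theorem pvN_nil : pvN [] = [[]] := by
  rw [pvN, sp_nil]
  simp only [List.reverse_nil, List.flatMap_cons, List.flatMap_nil, List.append_nil, pvF_nil]

theorem pvScan_eq_pvN (l : List Char) : ∀ cur,
    pvScan l cur = consHead cur.reverse (pvN l) := by
  intro cur
  induction l, cur using pvScan.induct with
  | case1 cur =>
    rw [pvScan, pvN_nil]
    simp only [consHead, List.append_nil]
  | case2 rest cur ih =>
    rw [pvScan, ih, pvN_comma]
    simp only [List.reverse_nil]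
    rw [consHead_nil_arg _ (pvN_ne_nil rest)]
    simp [consHead]
  | case3 rest cur ih =>
    rw [pvScan, ih, pvN_slash]
    simp only [List.reverse_nil]
    rw [consHead_nil_arg _ (pvN_ne_nil rest)]
    simp [consHead]
  | case4 rest cur ih =>
    rw [pvScan, ih, pvN_and]
    simp only [List.reverse_nil]
    rw [consHead_nil_arg _ (pvN_ne_nil rest)]
    simp [consHead]
  | case5 c rest cur h1 h2 h3 ih =>
    have hAND : ¬ (['A','N','D'] : List Char).isPrefixOf (c :: rest) = true := by
      intro h
      rw [List.isPrefixOf_iff_prefix] at h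
      obtain ⟨t, ht⟩ := h
      have hc : c = 'A' := by
        have := congrArg (fun x => x.head?) ht
        simpa using this.symm
      have hr : rest = 'N' :: 'D' :: t := by
        have := congrArg List.tail ht
        simpa using this.symm
      exact h3 t hc hr
    have hc1 : c ≠ ',' := fun hc => h1 hc
    have hc2 : c ≠ '/' := fun hc => h2 hc
    rw [pvScan.eq_5 cur c rest h1 h2 h3, ih, pvN_generic c rest hc1 hc2 hAND, consHead_consHead]
    simp

theorem FS_lstrip (a : List Char) :
    String.ofList (PySem.Chars.strip (PySem.Chars.lstrip a)) = String.ofList (PySem.Chars.strip a) := by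
  rw [strip_lstrip]

theorem FS_append_ws (a ws : List Char) (hws : ws.all PySem.Chars.isspace = true) :
    String.ofList (PySem.Chars.strip (a ++ ws)) = String.ofList (PySem.Chars.strip a) := by
  rw [strip_append_ws a ws hws]

-- the inner AND-level map, with the strip of its argument removed
theorem inner_eq (q : List Char) :
    (sp ['A','N','D'] (PySem.Chars.strip q) []).map (fun r => String.ofList (PySem.Chars.strip r)) =
    (sp ['A','N','D'] q []).map (fun r => String.ofList (PySem.Chars.strip r)) :=
  map_sp_strip ['A','N','D'] (by decide) (by decide) _ FS_lstrip FS_append_ws q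

-- the middle slash-level flatMap, with the strip of its argument removed
theorem mid_eq (p : List Char) :
    (sp ['/'] (PySem.Chars.strip p) []).flatMap
        (fun q => (sp ['A','N','D'] q []).map (fun r => String.ofList (PySem.Chars.strip r))) =
    (sp ['/'] p []).flatMap
        (fun q => (sp ['A','N','D'] q []).map (fun r => String.ofList (PySem.Chars.strip r))) := by
  have HGl : ∀ a, (sp ['A','N','D'] (PySem.Chars.lstrip a) []).map
      (fun r => String.ofList (PySem.Chars.strip r)) =
      (sp ['A','N','D'] a []).map (fun r => String.ofList (PySem.Chars.strip r)) :=
    fun a => map_sp_lstrip ['A','N','D'] (by decide) (by decide) _ FS_lstrip a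
  have HGr : ∀ a ws, ws.all PySem.Chars.isspace = true →
      (sp ['A','N','D'] (a ++ ws) []).map (fun r => String.ofList (PySem.Chars.strip r)) =
      (sp ['A','N','D'] a []).map (fun r => String.ofList (PySem.Chars.strip r)) :=
    fun a ws hws => map_sp_append_ws ['A','N','D'] (by decide) (by decide) _ FS_append_ws ws hws a []
  rw [List.flatMap_def, List.flatMap_def,
    map_sp_strip ['/'] (by decide) (by decide)
      (fun q => (sp ['A','N','D'] q []).map (fun r => String.ofList (PySem.Chars.strip r)))
      HGl HGr p]

-- ===== VERDICT (by name: the statement is the Claim_ definition above) =====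
theorem get_actors_from_actor_line_py_spec : Claim_equal_get_actors_from_actor_line_py := by
  unfold Claim_equal_get_actors_from_actor_line_py
  intro line _
  unfold Spec_get_actors_from_actor_line_py
  unfold get_actors_from_actor_line_py get_actors_from_actor_line_py_alt
  have e1 : ∀ l, PySem.Chars.splitOn l [','] = sp [','] l [] :=
    fun l => splitOn_eq_sp l [','] (by decide)
  have e2 : ∀ l, PySem.Chars.splitOn l ['/'] = sp ['/'] l [] :=
    fun l => splitOn_eq_sp l ['/'] (by decide)
  have e3 : ∀ l, PySem.Chars.splitOn l ['A','N','D'] = sp ['A','N','D'] l [] :=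
    fun l => splitOn_eq_sp l ['A','N','D'] (by decide)
  simp only [e1, e2, e3, PySem.List.foldl_append_singleton_eq_map,
    PySem.List.foldl_append_eq_flatMap, List.nil_append, List.map_flatMap, List.map_map]
  -- remove the intermediate strips on the A side
  simp only [Function.comp_def, inner_eq, mid_eq]
  -- rewrite the B side: the scan is the nested split
  rw [pvScan_eq_pvN]
  simp only [List.reverse_nil]
  rw [consHead_nil_arg _ (pvN_ne_nil (pvClean line))]
  rw [pvN, List.map_flatMap]
  simp only [pvF, List.map_flatMap]
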